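-- pv_equiv track=rewrite | github.com/bae1022/Coding-Test | Programmers/과일 장수.py | solution
-- ===== SOURCE A (Python) =====
-- def solution(k, m, score):
--     answer = 0
--
--     '''
--     사과의 최대 점수: k
--     한 상자에 들어가는 사과의 수: M
--     사과들의 점수: score
--     '''
--
--     score.sort(reverse=True)
--     for i in range(m - 1, len(score), m):
--         temp = score[i] * m
--         answer = answer + temp
--     return answer
-- ===== SOURCE B (Python) =====
-- def solution(k, m, score):
--     # Count each score once, then walk distinct values high-to-low and count
--     # whole boxes per value block arithmetically (no per-apple stride loop).
--     if m <= 0: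
--         return 0
--     counts = {}
--     for s in score:
--         counts[s] = counts.get(s, 0) + 1
--     answer = 0
--     pos = 0
--     for val in sorted(counts, reverse=True):
--         c = counts[val]
--         answer += val * m * ((pos + c) // m - pos // m)
--         pos += c
--     return answer
-- ===== Notes on version B (the rewrite author's own statement) =====
-- stated objective: alternative
-- what changed: Instead of sorting all n scores and striding over every m-th index, B counts each score once into a dict, sorts only the distinct values descending, and for each value block computes the number of complete boxes it closes arithmetically via floor-division, so the per-apple stride loop disappears (O(n + u log u) over distinct values u vs O(n log n)).
import Mathlib
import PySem

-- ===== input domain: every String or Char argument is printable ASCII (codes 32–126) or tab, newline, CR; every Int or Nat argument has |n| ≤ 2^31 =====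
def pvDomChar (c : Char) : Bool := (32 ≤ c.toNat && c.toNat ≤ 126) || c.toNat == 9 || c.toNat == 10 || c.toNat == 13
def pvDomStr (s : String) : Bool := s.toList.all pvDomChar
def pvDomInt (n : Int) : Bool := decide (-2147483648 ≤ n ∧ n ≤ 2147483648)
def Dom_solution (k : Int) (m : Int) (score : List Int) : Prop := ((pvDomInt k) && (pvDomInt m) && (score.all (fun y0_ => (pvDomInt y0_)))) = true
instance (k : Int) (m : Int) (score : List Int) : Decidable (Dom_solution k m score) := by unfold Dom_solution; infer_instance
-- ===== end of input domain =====

-- B replaces the sort-everything-then-stride loop by a count-per-value dict walked over the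
-- sorted distinct values with an arithmetic box count per value block (alternative algorithm).
-- Note: Python A sorts `score` in place; the equivalence proved here is about the return value only.

-- ===== PORT A =====
def solution (k : Int) (m : Int) (score : List Int) : Int :=
  let s := PySem.List.sorted score (fun x => x) true
  -- score[i] is always in range when this loop body runs, so pyGetD's default is never used
  (PySem.List.pyRange (m - 1) (PySem.List.len s) m).foldl
    (fun answer i => answer + PySem.List.pyGetD s i 0 * m) 0

-- ===== PORT B =====
def solution_alt (k : Int) (m : Int) (score : List Int) : Int :=
  if m ≤ 0 then 0
  else
    let counts := score.foldl (fun d x => d.insert x (d.getD x 0 + 1)) PySem.Dict.empty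
    ((PySem.List.sorted counts.keys (fun x => x) true).foldl
      (fun (st : Int × Int) v =>
        (st.1 + v * m * (PySem.Int.floordiv (st.2 + counts.getD v 0) m
                          - PySem.Int.floordiv st.2 m),
         st.2 + counts.getD v 0))
      (0, 0)).1

-- ===== PRECONDITION & SPEC =====
-- Pre_ excludes only m = 0, on which Python A raises ValueError (range() arg 3 must not be zero).
def Pre_solution (k : Int) (m : Int) (score : List Int) : Prop := m ≠ 0
instance (k : Int) (m : Int) (score : List Int) : Decidable (Pre_solution k m score) := by unfold Pre_solution; infer_instance
def pvWitness_solution : Int × Int × List Int := (5, 2, [3, 1, 2, 3])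

def Spec_solution (k : Int) (m : Int) (score : List Int) (out : Int) : Prop := out = solution_alt k m score
instance (k : Int) (m : Int) (score : List Int) (out : Int) : Decidable (Spec_solution k m score out) := by unfold Spec_solution; infer_instance

-- ===== CLAIM (what is proved, stated in full; the proofs are below) =====
def Claim_equal_solution : Prop := ∀ (k : Int) (m : Int) (score : List Int), Dom_solution k m score → Pre_solution k m score → Spec_solution k m score (solution k m score)

-- ===== LEMMAS AND PROOFS =====

-- G m pos l : the contribution of a list segment l placed at global offset pos in the sorted
-- list: positions whose (1-based) global index is divisible by m contribute elt*m.
def G (m : Int) : Nat → List Int → Int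
  | _, [] => 0
  | pos, x :: t => (if (pos + 1) % m.toNat = 0 then x * m else 0) + G m (pos + 1) t

theorem G_append (m : Int) (l1 l2 : List Int) : ∀ pos : Nat,
    G m pos (l1 ++ l2) = G m pos l1 + G m (pos + l1.length) l2 := by
  induction l1 with
  | nil => intro pos; simp [G]
  | cons x t ih =>
    intro pos
    simp only [List.cons_append, G, ih (pos + 1), List.length_cons]
    have h : pos + 1 + t.length = pos + (t.length + 1) := by omega
    rw [h]; ring

theorem G_replicate (m : Int) (hm : 0 < m) (v : Int) : ∀ (c pos : Nat),
    G m pos (List.replicate c v)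
      = v * m * ((((pos + c) / m.toNat : Nat) : Int) - ((pos / m.toNat : Nat) : Int)) := by
  intro c
  induction c with
  | zero => intro pos; simp [G]
  | succ c ih =>
    intro pos
    rw [List.replicate_succ]
    simp only [G, ih (pos + 1)]
    have hd : (pos + 1) / m.toNat = pos / m.toNat + if m.toNat ∣ pos + 1 then 1 else 0 :=
      Nat.succ_div
    have hdvd : (pos + 1) % m.toNat = 0 ↔ m.toNat ∣ pos + 1 :=
      (Nat.dvd_iff_mod_eq_zero).symm
    by_cases h : m.toNat ∣ pos + 1
    · rw [if_pos (hdvd.mpr h)]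
      rw [if_pos h] at hd
      have : pos + 1 + c = pos + (c + 1) := by omega
      rw [this] at *
      push_cast [hd]
      ring
    · rw [if_neg (fun hc => h (hdvd.mp hc))]
      rw [if_neg h] at hd
      have : pos + 1 + c = pos + (c + 1) := by omega
      rw [this] at *
      push_cast [hd]
      ring

theorem pyRange_shift (a b s : Int) (hs : 0 < s) :
    PySem.List.pyRange (a + 1) (b + 1) s = (PySem.List.pyRange a b s).map (· + 1) := by
  rw [PySem.List.pyRange_of_pos _ _ hs, PySem.List.pyRange_of_pos _ _ hs, List.map_map]
  by_cases h : a < b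
  · rw [if_pos (by omega : a + 1 < b + 1), if_pos h]
    have hc : b + 1 - (a + 1) = b - a := by ring
    rw [hc]
    congr 1
    funext k
    simp only [Function.comp_apply]
    ring
  · rw [if_neg (by omega : ¬ a + 1 < b + 1), if_neg h]
    simp

theorem pyRange_cons_zero (b s : Int) (hs : 0 < s) (hb : 0 < b) :
    PySem.List.pyRange 0 b s = 0 :: PySem.List.pyRange s b s := by
  rw [PySem.List.pyRange_of_pos _ _ hs, PySem.List.pyRange_of_pos _ _ hs]
  have hq0 : 0 ≤ (b - 1) / s := Int.ediv_nonneg (by omega) (by omega)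
  have h1 : (b - 0 + s - 1) / s = (b - 1) / s + 1 := by
    have h := Int.add_mul_ediv_right (b - 1) 1 (by omega : s ≠ 0)
    have e : b - 0 + s - 1 = b - 1 + 1 * s := by ring
    rw [e, h]
  rw [if_pos hb, h1]
  have h2 : (if s < b then ((b - s + s - 1) / s).toNat else 0) = ((b - 1) / s).toNat := by
    by_cases h : s < b
    · rw [if_pos h]; congr 2; ring
    · rw [if_neg h]
      have : (b - 1) / s = 0 := Int.ediv_eq_zero_of_lt (by omega) (by omega)
      omega
  rw [h2]
  have h3 : ((b - 1) / s + 1).toNat = ((b - 1) / s).toNat + 1 := by omega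
  rw [h3, List.range_succ_eq_map]
  simp only [List.map_cons, List.map_map, Nat.cast_zero]
  congr 1
  · ring
  apply List.map_congr_left
  intro k _
  simp only [Function.comp_apply]
  push_cast
  ring

theorem pyGetD_cons_succ (x : Int) (t : List Int) (i : Int) (hi : 0 ≤ i) (d : Int) :
    PySem.List.pyGetD (x :: t) (i + 1) d = PySem.List.pyGetD t i d := by
  obtain ⟨n, rfl⟩ := Int.eq_ofNat_of_zero_le hi
  have h : ((n : Int) + 1) = ((n + 1 : Nat) : Int) := by push_cast; ring
  rw [h, PySem.List.pyGetD_natCast, PySem.List.pyGetD_natCast]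
  simp

theorem stepShift (m : Int) (hm : 0 < m) (x : Int) (t : List Int) (a' : Int) (ha : 0 ≤ a') (acc : Int) :
    (PySem.List.pyRange (a' + 1) ((t.length : Int) + 1) m).foldl
      (fun answer i => answer + PySem.List.pyGetD (x :: t) i 0 * m) acc
    = (PySem.List.pyRange a' (t.length : Int) m).foldl
      (fun answer i => answer + PySem.List.pyGetD t i 0 * m) acc := by
  rw [pyRange_shift _ _ _ hm, List.foldl_map]
  apply PySem.List.foldl_congr_mem
  intro a i hi
  have h0 : 0 ≤ i := by
    have := (PySem.List.mem_pyRange_iff_of_pos hm i).mp hi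
    omega
  rw [pyGetD_cons_succ x t i h0]

-- A's strided loop over indices of l, started with countdown offset pos (next pick when the
-- 1-based global position is divisible by m), equals G m pos l.
theorem lemA (m : Int) (hm : 0 < m) : ∀ (l : List Int) (pos : Nat) (acc : Int),
    (PySem.List.pyRange ((m.toNat - 1 - pos % m.toNat : Nat) : Int) (PySem.List.len l) m).foldl
      (fun answer i => answer + PySem.List.pyGetD l i 0 * m) acc
    = acc + G m pos l := by
  have hM : 0 < m.toNat := by omega
  intro l
  induction l with
  | nil =>
    intro pos acc
    rw [PySem.List.pyRange_of_pos _ _ hm]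
    rw [if_neg (by simp [PySem.List.len_eq] : ¬ ((m.toNat - 1 - pos % m.toNat : Nat) : Int) < PySem.List.len ([] : List Int))]
    simp [G]
  | cons x t ih =>
    intro pos acc
    simp only [PySem.List.len_eq] at ih
    have hlen : PySem.List.len (x :: t) = (t.length : Int) + 1 := by
      simp [PySem.List.len_eq]
    rw [hlen]
    by_cases hr : pos % m.toNat = m.toNat - 1
    · -- pick this element
      have hcast : ((m.toNat - 1 - pos % m.toNat : Nat) : Int) = 0 := by
        rw [hr]; simp
      rw [hcast]
      rw [pyRange_cons_zero _ _ hm (by positivity)]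
      simp only [List.foldl_cons]
      have hget0 : PySem.List.pyGetD (x :: t) 0 0 = x := by
        have h : ((0:Nat) : Int) = (0 : Int) := by simp
        rw [← h, PySem.List.pyGetD_natCast]; simp
      rw [hget0]
      have hmod : (pos + 1) % m.toNat = 0 := by
        have h := Nat.add_mod pos 1 m.toNat
        rcases Nat.lt_or_ge 1 m.toNat with hlt | hge
        · rw [h, hr, Nat.mod_eq_of_lt hlt]
          have e : m.toNat - 1 + 1 = m.toNat := by omega
          rw [e]; simp
        · have hm1 : m.toNat = 1 := by omega
          simp [hm1, Nat.mod_one]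
      have hshift : ((m.toNat - 1 - (pos + 1) % m.toNat : Nat) : Int) + 1 = m := by
        rw [hmod]; simp; omega
      have hstep := stepShift m hm x t ((m.toNat - 1 - (pos + 1) % m.toNat : Nat) : Int) (by positivity) (acc + x * m)
      rw [hshift] at hstep
      rw [hstep, ih (pos + 1) (acc + x * m)]
      simp only [G, if_pos hmod]
      ring
    · -- skip this element
      have hlt : pos % m.toNat < m.toNat - 1 := by
        have := Nat.mod_lt pos hM
        omega
      have hmod : (pos + 1) % m.toNat = pos % m.toNat + 1 := by
        rw [Nat.add_mod, Nat.mod_eq_of_lt (by omega : 1 < m.toNat)]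
        exact Nat.mod_eq_of_lt (by omega)
      have hshift : ((m.toNat - 1 - (pos + 1) % m.toNat : Nat) : Int) + 1
          = ((m.toNat - 1 - pos % m.toNat : Nat) : Int) := by
        rw [hmod]
        have e1 : m.toNat - 1 - (pos % m.toNat + 1) + 1 = m.toNat - 1 - pos % m.toNat := by omega
        exact_mod_cast congrArg (Nat.cast : Nat → Int) e1
      have hstep := stepShift m hm x t ((m.toNat - 1 - (pos + 1) % m.toNat : Nat) : Int) (by positivity) acc
      rw [hshift] at hstep
      rw [hstep, ih (pos + 1) acc]
      simp only [G, if_neg (by omega : ¬ (pos + 1) % m.toNat = 0)]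
      ring_nf

theorem lemB (m : Int) (hm : 0 < m) (cnt : Int → Nat) : ∀ (vs : List Int) (acc : Int) (pos : Nat),
    vs.foldl
      (fun (st : Int × Int) v =>
        (st.1 + v * m * (PySem.Int.floordiv (st.2 + ((cnt v : Nat) : Int)) m
                          - PySem.Int.floordiv st.2 m),
         st.2 + ((cnt v : Nat) : Int)))
      (acc, (pos : Int))
    = (acc + G m pos (vs.flatMap fun v => List.replicate (cnt v) v),
       ((pos + (vs.map cnt).sum : Nat) : Int)) := by
  have hmM : m = (m.toNat : Int) := (Int.toNat_of_nonneg hm.le).symm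
  intro vs
  induction vs with
  | nil => intro acc pos; simp [G]
  | cons v vs ih =>
    intro acc pos
    simp only [List.foldl_cons]
    have hcast : (pos : Int) + ((cnt v : Nat) : Int) = ((pos + cnt v : Nat) : Int) := by push_cast; ring
    rw [hcast, ih]
    have hfd1 : PySem.Int.floordiv ((pos + cnt v : Nat) : Int) m = (((pos + cnt v) / m.toNat : Nat) : Int) := by
      rw [hmM]; exact_mod_cast PySem.Int.floordiv_natCast (pos + cnt v) m.toNat
    have hfd2 : PySem.Int.floordiv ((pos : Nat) : Int) m = ((pos / m.toNat : Nat) : Int) := by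
      rw [hmM]; exact_mod_cast PySem.Int.floordiv_natCast pos m.toNat
    simp only [List.flatMap_cons, G_append, List.length_replicate, List.map_cons, List.sum_cons]
    rw [G_replicate m hm v (cnt v) pos, hfd1, hfd2]
    refine Prod.ext ?_ ?_
    · simp only []
      ring
    · simp only []
      congr 1
      omega

theorem sumCountIf (v : Int) (cnt : Int → Nat) : ∀ (vs : List Int), vs.Nodup →
    ((vs.map fun u => List.count v (List.replicate (cnt u) u)).sum)
      = if v ∈ vs then cnt v else 0 := by
  intro vs
  induction vs with
  | nil => simp
  | cons u vs ih =>
    intro hnd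
    rcases List.nodup_cons.mp hnd with ⟨hu, hnd'⟩
    simp only [List.map_cons, List.sum_cons, ih hnd', List.mem_cons]
    by_cases h : v = u
    · subst h
      rw [List.count_replicate]
      simp [hu]
    · rw [List.count_replicate]
      simp [h, Ne.symm h]

-- The descending-sorted list is the concatenation of the constant blocks of its distinct
-- values taken in descending order.
theorem grouping (score : List Int) :
    PySem.List.sorted score (fun x => x) true
      = (PySem.List.sorted (PySem.Set.ofList score) (fun x => x) true).flatMap
          (fun v => List.replicate (score.count v) v) := by
  have hndvs : (PySem.List.sorted (PySem.Set.ofList score) (fun x => x) true).Nodup :=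
    (PySem.List.sorted_perm _ _ _).symm.nodup (PySem.Set.nodup_ofList score)
  apply PySem.List.eq_of_perm_of_pairwise_le_of_injective (key := fun x : Int => -x)
    (fun a b h => by simpa using h)
  · -- permutation
    refine (PySem.List.sorted_perm _ _ _).trans (List.perm_iff_count.mpr ?_)
    intro v
    rw [List.flatMap_def, List.count_flatten, List.map_map]
    have h := sumCountIf v (fun u => score.count u) _ hndvs
    simp only [Function.comp_def] at h ⊢
    rw [h]
    by_cases hv : v ∈ score
    · rw [if_pos (by rw [PySem.List.mem_sorted, PySem.Set.mem_ofList]; exact hv)]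
    · rw [if_neg (by rw [PySem.List.mem_sorted, PySem.Set.mem_ofList]; exact hv)]
      exact List.count_eq_zero.mpr hv
  · exact (PySem.List.sorted_pairwise_rev score _).imp (fun h => by omega)
  · rw [List.flatMap_def]
    rw [List.pairwise_flatten]
    constructor
    · intro l hl
      rcases List.mem_map.mp hl with ⟨u, _, rfl⟩
      exact List.pairwise_replicate.mpr (Or.inr (le_refl _))
    · rw [List.pairwise_map]
      refine (PySem.List.sorted_pairwise_rev _ _).imp ?_
      intro a b h x hx y hy
      rw [List.eq_of_mem_replicate hx, List.eq_of_mem_replicate hy]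
      omega

-- ===== VERDICT (by name: the statement is the Claim_ definition above) =====
theorem solution_spec : Claim_equal_solution := by
  intro k m score _ hpre
  unfold Spec_solution solution solution_alt
  by_cases hm : m ≤ 0
  · -- m < 0: A's range is empty, B's guard fires
    have hmlt : m < 0 := lt_of_le_of_ne hm hpre
    rw [if_pos hm]
    have : PySem.List.pyRange (m - 1) (PySem.List.len (PySem.List.sorted score (fun x => x) true)) m = [] := by
      simp only [PySem.List.pyRange, PySem.List.len_eq]
      rw [if_neg (by omega : ¬ m = 0)]
      rw [if_neg (by omega : ¬ (0:Int) < m)]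
      have hlen : (0:Int) ≤ ((PySem.List.sorted score (fun x => x) true).length : Int) := Int.natCast_nonneg _
      rw [if_neg (by omega : ¬ ((PySem.List.sorted score (fun x => x) true).length : Int) < m - 1)]
      simp
    simp only [this, List.foldl_nil]
  · -- m > 0
    have hm' : 0 < m := by omega
    rw [if_neg hm]
    simp only [PySem.Dict.foldl_insert_getD_add_one_eq_counter, PySem.Dict.keys_counter,
      PySem.Dict.getD_counter]
    have hstart : m - 1 = ((m.toNat - 1 - (0 : Nat) % m.toNat : Nat) : Int) := by
      simp; omega
    rw [hstart, lemA m hm' (PySem.List.sorted score (fun x => x) true) 0 0]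
    have hz : ((0 : Int), (0 : Int)) = ((0 : Int), (((0 : Nat) : Nat) : Int)) := by simp
    rw [hz, lemB m hm' (fun v => score.count v)]
    rw [grouping score]
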